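-- pv_equiv track=rewrite | github.com/MiskaHalonen/TRAI_mooc | viikko4/distribution.py | create_distribution
-- ===== SOURCE A (Python) =====
-- def create_distribution(string):
--     osajoukot = set()
--     n = len(string)
--
--     for i in range(n):
--         current_substring = ""
--         for j in range(i, min(i + 20, n)):  # Koska merkkijonon pituus on enintään 20
--             current_substring += string[j]
--             osajoukot.add((current_substring, len(current_substring)))  # hylkää automaattisesti duplikaatit joten
--             # voidaan huoletta lisätä kaikki löydetyt
--
--
--     distribution = {} # sanakirja johon tulokset tallennetaan
--     for osajoukko, pituus in osajoukot:
--         if pituus in distribution: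
--             distribution[pituus] += 1
--         else:
--             distribution[pituus] = 1
--
--     #jörjestetään lista vielä osajoukkojen pituuden mukaan
--     sorted_distribution = dict(sorted(distribution.items()))
--
--     return sorted_distribution
-- ===== SOURCE B (Python) =====
-- def create_distribution(string):
--     n = len(string)
--     distribution = {}
--     for k in range(1, min(20, n) + 1):
--         distribution[k] = len({string[i:i+k] for i in range(n - k + 1)})
--     return distribution
-- ===== Notes on version B (the rewrite author's own statement) =====
-- stated objective: simpler
-- what changed: Instead of accumulating a set of (substring, length) pairs over growing prefixes and then tallying them length-by-length in a second counting loop followed by a sort, B loops over each length k = 1..min(20, n) in ascending order and directly stores the size of the set of length-k windows, so the pair set, the counting loop and the final sort all disappear.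
import Mathlib
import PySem

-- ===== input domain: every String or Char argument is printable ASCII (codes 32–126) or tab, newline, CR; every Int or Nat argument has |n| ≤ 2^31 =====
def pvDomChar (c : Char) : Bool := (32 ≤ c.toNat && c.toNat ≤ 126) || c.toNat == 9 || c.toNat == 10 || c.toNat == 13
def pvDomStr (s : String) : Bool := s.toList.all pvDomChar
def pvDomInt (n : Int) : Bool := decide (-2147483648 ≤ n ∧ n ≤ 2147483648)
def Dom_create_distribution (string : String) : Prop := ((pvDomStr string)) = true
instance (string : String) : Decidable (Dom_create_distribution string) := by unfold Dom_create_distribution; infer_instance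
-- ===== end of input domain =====

-- B replaces A's pair-set + separate counting loop + final sort by one ascending loop over
-- the lengths 1..min(20,n) that directly records the number of distinct windows of each
-- length (objective: simpler).

-- ===== PORT A =====
-- inner loop body: current_substring += string[j]; osajoukot.add((current_substring, len(current_substring)))
def pvA_innerStep (cs : List Char) (st : List Char × PySem.Set (List Char × Int)) (j : Int) :
    List Char × PySem.Set (List Char × Int) :=
  let cur := st.1 ++ [PySem.List.pyGetD cs j ' ']
  (cur, PySem.Set.add st.2 (cur, (cur.length : Int)))

-- one iteration of the outer 'for i in range(n)' loop
def pvA_outerStep (cs : List Char) (n : Int) (s : PySem.Set (List Char × Int)) (i : Int) :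
    PySem.Set (List Char × Int) :=
  ((PySem.List.pyRange i (min (i + 20) n)).foldl (pvA_innerStep cs) (([] : List Char), s)).2

-- osajoukot after both loops
def pvA_set (cs : List Char) (n : Int) : PySem.Set (List Char × Int) :=
  (PySem.List.pyRange 0 n).foldl (pvA_outerStep cs n) PySem.Set.empty

-- if pituus in distribution: distribution[pituus] += 1 else: distribution[pituus] = 1
def pvA_countStep (d : PySem.Dict Int Int) (p : List Char × Int) : PySem.Dict Int Int :=
  if d.contains p.2 then d.insert p.2 (d.getD p.2 0 + 1) else d.insert p.2 1

def create_distribution (string : String) : List (Int × Int) :=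
  let cs := string.toList
  let n : Int := PySem.Str.len string
  let osajoukot := pvA_set cs n
  let distribution := osajoukot.foldl pvA_countStep PySem.Dict.empty
  PySem.List.sorted2 distribution.items (fun p => p.1) (fun p => p.2)

-- ===== PORT B =====
-- len({string[i:i+k] for i in range(n - k + 1)})
def pvB_count (cs : List Char) (n k : Int) : Int :=
  ((PySem.Set.ofList
      ((PySem.List.pyRange 0 (n - k + 1)).map
        (fun i => PySem.List.slice cs (some i) (some (i + k))))).length : Int)

def create_distribution_alt (string : String) : List (Int × Int) :=
  let cs := string.toList
  let n : Int := PySem.Str.len string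
  (PySem.List.pyRange 1 (min 20 n + 1)).foldl
    (fun acc k => acc ++ [(k, pvB_count cs n k)]) []

-- ===== PRECONDITION & SPEC =====
def Spec_create_distribution (string : String) (out : List (Int × Int)) : Prop := out = create_distribution_alt string
instance (string : String) (out : List (Int × Int)) : Decidable (Spec_create_distribution string out) := by unfold Spec_create_distribution; infer_instance

-- ===== CLAIM (what is proved, stated in full; the proofs are below) =====
def Claim_equal_create_distribution : Prop := ∀ (string : String), Dom_create_distribution string → Spec_create_distribution string (create_distribution string)

-- ===== LEMMAS AND PROOFS =====

theorem pv_mem_foldl_gen {α β : Type} [BEq α] (F : PySem.Set α → β → PySem.Set α)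
    (Q : β → α → Prop) :
    ∀ (l : List β), (∀ s, ∀ i ∈ l, ∀ y, y ∈ F s i ↔ y ∈ s ∨ Q i y) →
    ∀ (s : PySem.Set α) (y : α), (y ∈ l.foldl F s ↔ y ∈ s ∨ ∃ i ∈ l, Q i y) := by
  intro l
  induction l with
  | nil => intro _ s y; simp
  | cons a l ih =>
    intro h s y
    simp only [List.foldl_cons]
    rw [ih (fun s i hi y => h s i (List.mem_cons_of_mem a hi) y), h s a (List.mem_cons_self) y]
    simp only [List.mem_cons]
    constructor
    · rintro ((hy | hq) | ⟨i, hi, hq⟩)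
      · exact Or.inl hy
      · exact Or.inr ⟨a, Or.inl rfl, hq⟩
      · exact Or.inr ⟨i, Or.inr hi, hq⟩
    · rintro (hy | ⟨i, (rfl | hi), hq⟩)
      · exact Or.inl (Or.inl hy)
      · exact Or.inl (Or.inr hq)
      · exact Or.inr ⟨i, hi, hq⟩

theorem pv_nodup_foldl_gen {α β : Type} [BEq α] (F : PySem.Set α → β → PySem.Set α) :
    ∀ (l : List β), (∀ s, ∀ i ∈ l, s.Nodup → (F s i).Nodup) →
    ∀ (s : PySem.Set α), s.Nodup → (l.foldl F s).Nodup := by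
  intro l
  induction l with
  | nil => intro _ s hs; simpa using hs
  | cons a l ih =>
    intro h s hs
    exact ih (fun s i hi => h s i (List.mem_cons_of_mem a hi)) _ (h s a List.mem_cons_self hs)

theorem pv_inner_nodup (cs : List Char) :
    ∀ (l : List Int) (st : List Char × PySem.Set (List Char × Int)), st.2.Nodup →
      ((l.foldl (pvA_innerStep cs) st).2).Nodup := by
  intro l
  induction l with
  | nil => intro st h; simpa using h
  | cons a l ih =>
    intro st h
    exact ih _ (PySem.Set.nodup_add _ _ h)

theorem pv_count_eq_counter (S : PySem.Set (List Char × Int)) :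
    S.foldl pvA_countStep PySem.Dict.empty = PySem.Dict.counter (S.map Prod.snd) := by
  have hstep : pvA_countStep = fun (d : PySem.Dict Int Int) (p : List Char × Int) =>
      d.insert p.2 (d.getD p.2 0 + 1) := by
    funext d p
    unfold pvA_countStep
    by_cases h : d.contains p.2 = true
    · simp [h]
    · simp only [Bool.not_eq_true] at h
      simp [h, PySem.Dict.getD_of_not_contains d 0 h]
  rw [hstep, ← PySem.Dict.foldl_insert_getD_add_one_eq_counter, List.foldl_map]

theorem pv_pyRange_one_map (m : Nat) :
    PySem.List.pyRange 1 ((m : Int) + 1) = (List.range m).map (fun (j : Nat) => ((j : Int) + 1)) := by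
  induction m with
  | zero =>
    simp only [Nat.cast_zero, zero_add, List.range_zero, List.map_nil]
    decide
  | succ m ih =>
    have h1 : ((m+1 : Nat) : Int) + 1 = ((m : Int) + 1) + 1 := by push_cast; ring
    rw [h1, PySem.List.pyRange_one_succ_right (by omega), ih]
    simp [List.range_succ]

theorem pv_insertBy_congr {α : Type} (before before' : α → α → Bool) (x : α) :
    ∀ (acc : List α), (∀ b ∈ acc, before x b = before' x b) →
      PySem.List.insertBy before x acc = PySem.List.insertBy before' x acc := by
  intro acc
  induction acc with
  | nil => intro _; rfl
  | cons y ys ih =>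
    intro h
    simp only [PySem.List.insertBy]
    rw [h y List.mem_cons_self, ih (fun b hb => h b (List.mem_cons_of_mem y hb))]

theorem pv_inner_mem (cs : List Char) (i : Nat) :
    ∀ (d : Nat) (a : Nat) (s : PySem.Set (List Char × Int)), i ≤ a → (∀ b : Nat, a ≤ b → b ≤ cs.length → b - a = d →
    ∀ y, (y ∈ (((PySem.List.pyRange (a : Int) (b : Int)).foldl (pvA_innerStep cs)
          (List.take (a - i) (List.drop i cs), s)).2) ↔
      y ∈ s ∨ ∃ t : Nat, a - i < t ∧ t ≤ b - i ∧ y = (List.take t (List.drop i cs), (t : Int)))) := by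
  intro d
  induction d with
  | zero =>
    intro a s hia b hab hbl hd y
    have hba : a = b := by omega
    subst hba
    have hnil : PySem.List.pyRange (a : Int) (a : Int) = [] := by
      rw [List.eq_nil_iff_forall_not_mem]
      intro x hx
      rw [PySem.List.mem_pyRange_one] at hx
      omega
    rw [hnil]
    simp only [List.foldl_nil]
    constructor
    · exact Or.inl
    · rintro (hy | ⟨t, ht1, ht2, _⟩)
      · exact hy
      · omega
  | succ d ih =>
    intro a s hia b hab hbl hd y
    have hlt : a < b := by omega
    have ha : a < cs.length := by omega
    have hcons : PySem.List.pyRange (a : Int) (b : Int)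
        = (a : Int) :: PySem.List.pyRange ((a+1 : Nat) : Int) (b : Int) := by
      rw [PySem.List.pyRange_one_cons (by exact_mod_cast hlt)]
      norm_num
    rw [hcons]
    simp only [List.foldl_cons, pvA_innerStep]
    have hget : PySem.List.pyGetD cs ((a : Nat) : Int) ' ' = cs[a] := by
      rw [PySem.List.pyGetD_natCast, List.getD_eq_getElem cs ' ' ha]
    have hdrop : a - i < (List.drop i cs).length := by
      rw [List.length_drop]; omega
    have hidx : (List.drop i cs)[a - i] = cs[a] := by
      rw [List.getElem_drop]
      congr 1
      omega
    have hcur : List.take (a - i) (List.drop i cs) ++ [PySem.List.pyGetD cs ((a : Nat) : Int) ' ']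
        = List.take (a + 1 - i) (List.drop i cs) := by
      rw [hget, ← hidx, ← List.concat_eq_append, List.take_concat_get hdrop]
      congr 1
      omega
    have hlencur : ((List.take (a + 1 - i) (List.drop i cs)).length : Int) = ((a + 1 - i : Nat) : Int) := by
      congr 1
      rw [List.length_take, List.length_drop]
      omega
    rw [hcur, hlencur]
    rw [ih (a+1) (PySem.Set.add s (List.take (a + 1 - i) (List.drop i cs), ((a + 1 - i : Nat) : Int)))
        (by omega) b (by omega) hbl (by omega) y]
    rw [PySem.Set.mem_add]
    constructor
    · rintro ((hy | hy) | ⟨t, ht1, ht2, hy⟩)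
      · exact Or.inl hy
      · exact Or.inr ⟨a + 1 - i, by omega, by omega, hy⟩
      · exact Or.inr ⟨t, by omega, ht2, hy⟩
    · rintro (hy | ⟨t, ht1, ht2, hy⟩)
      · exact Or.inl (Or.inl hy)
      · by_cases hteq : t = a + 1 - i
        · subst hteq; exact Or.inl (Or.inr hy)
        · exact Or.inr ⟨t, by omega, ht2, hy⟩

theorem pv_outerStep_mem (cs : List Char) (i : Nat) (hi : i < cs.length)
    (s : PySem.Set (List Char × Int)) (y : List Char × Int) :
    y ∈ pvA_outerStep cs (cs.length : Int) s (i : Int) ↔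
      y ∈ s ∨ ∃ t : Nat, 0 < t ∧ t ≤ min (i + 20) cs.length - i ∧
        y = (List.take t (List.drop i cs), (t : Int)) := by
  unfold pvA_outerStep
  have hmin : min (((i : Nat) : Int) + 20) ((cs.length : Nat) : Int)
      = ((min (i + 20) cs.length : Nat) : Int) := by
    push_cast
    rfl
  have h0 : (([] : List Char), s) = (List.take (i - i) (List.drop i cs), s) := by
    simp
  rw [hmin, h0, pv_inner_mem cs i (min (i + 20) cs.length - i) i s (le_refl i)
    (min (i + 20) cs.length) (by omega) (by omega) rfl y]
  have h00 : i - i = 0 := by omega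
  rw [h00]

theorem pv_mem_set (cs : List Char) (y : List Char × Int) :
    y ∈ pvA_set cs (cs.length : Int) ↔
      ∃ i t : Nat, i + t ≤ cs.length ∧ 0 < t ∧ t ≤ 20 ∧
        y = (List.take t (List.drop i cs), (t : Int)) := by
  unfold pvA_set
  rw [PySem.List.pyRange_zero_natCast, List.foldl_map]
  rw [pv_mem_foldl_gen (fun s j => pvA_outerStep cs (cs.length : Int) (s : PySem.Set (List Char × Int)) ((j : Nat) : Int))
    (fun i y => ∃ t : Nat, 0 < t ∧ t ≤ min (i + 20) cs.length - i ∧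
        y = (List.take t (List.drop i cs), (t : Int)))
    (List.range cs.length)
    (fun s i hi y => pv_outerStep_mem cs i (List.mem_range.mp hi) s y) PySem.Set.empty y]
  simp only [PySem.Set.empty, List.not_mem_nil, false_or, List.mem_range]
  constructor
  · rintro ⟨i, hi, t, ht1, ht2, hy⟩
    exact ⟨i, t, by omega, ht1, by omega, hy⟩
  · rintro ⟨i, t, hit, ht1, ht2, hy⟩
    exact ⟨i, by omega, t, ht1, by omega, hy⟩

theorem pv_nodup_set (cs : List Char) : (pvA_set cs (cs.length : Int)).Nodup := by
  unfold pvA_set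
  apply pv_nodup_foldl_gen
  · intro s i _ hs
    exact pv_inner_nodup cs _ _ hs
  · exact List.nodup_nil

theorem pv_mem_B_windows (cs : List Char) (k : Nat) (y : List Char) :
    y ∈ (PySem.List.pyRange 0 ((cs.length : Int) - (k : Int) + 1)).map
        (fun i => PySem.List.slice cs (some i) (some (i + (k : Int)))) ↔
      ∃ i : Nat, i + k ≤ cs.length ∧ y = List.take k (List.drop i cs) := by
  rw [List.mem_map]
  constructor
  · rintro ⟨z, hz, rfl⟩
    rw [PySem.List.mem_pyRange_one] at hz
    obtain ⟨hz0, hz1⟩ := hz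
    obtain ⟨i, rfl⟩ : ∃ i : Nat, z = (i : Int) := ⟨z.toNat, by omega⟩
    refine ⟨i, by omega, ?_⟩
    have h2 : (i : Int) + (k : Int) = (((i + k : Nat)) : Int) := by push_cast; ring
    rw [h2, PySem.List.slice_natCast]
    congr 1
    omega
  · rintro ⟨i, hik, rfl⟩
    refine ⟨(i : Int), ?_, ?_⟩
    · rw [PySem.List.mem_pyRange_one]
      constructor
      · exact Int.natCast_nonneg i
      · omega
    · have h2 : (i : Int) + (k : Int) = (((i + k : Nat)) : Int) := by push_cast; ring
      rw [h2, PySem.List.slice_natCast]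
      congr 1
      omega

theorem pv_count_agree (cs : List Char) (k : Nat) (hk0 : 0 < k) (hk20 : k ≤ 20)
    (hkN : k ≤ cs.length) :
    (((pvA_set cs (cs.length : Int)).map Prod.snd).count ((k : Nat) : Int) : Int)
      = pvB_count cs (cs.length : Int) ((k : Nat) : Int) := by
  have hcount : ((pvA_set cs (cs.length : Int)).map Prod.snd).count ((k : Nat) : Int)
      = ((pvA_set cs (cs.length : Int)).filter (fun p => p.2 == ((k : Nat) : Int))).length := by
    rw [List.count_eq_countP, List.countP_map, List.countP_eq_length_filter]
    rfl
  set S := pvA_set cs (cs.length : Int) with hS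
  set F := S.filter (fun p => p.2 == ((k : Nat) : Int)) with hF
  set Bl := (PySem.List.pyRange 0 ((cs.length : Int) - (k : Int) + 1)).map
        (fun i => PySem.List.slice cs (some i) (some (i + (k : Int)))) with hBl
  have hmemF : ∀ p ∈ F, p.2 = ((k : Nat) : Int) := by
    intro p hp
    have := (List.mem_filter.mp hp).2
    exact beq_iff_eq.mp this
  have hndF : F.Nodup := (pv_nodup_set cs).filter _
  have hndFm : (F.map Prod.fst).Nodup := by
    refine List.Nodup.map_on ?_ hndF
    intro x hx y hy hxy
    have h1 := hmemF x hx
    have h2 := hmemF y hy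
    exact Prod.ext hxy (h1.trans h2.symm)
  have hndB : (PySem.Set.ofList Bl).Nodup := PySem.Set.nodup_ofList _
  have hmemiff : ∀ y, y ∈ F.map Prod.fst ↔ y ∈ PySem.Set.ofList Bl := by
    intro y
    rw [PySem.Set.mem_ofList, hBl, pv_mem_B_windows cs k, List.mem_map]
    constructor
    · rintro ⟨p, hp, rfl⟩
      obtain ⟨hpS, hpk⟩ := List.mem_filter.mp hp
      obtain ⟨i, t, hit, ht0, ht20, rfl⟩ := (pv_mem_set cs p).mp hpS
      have : ((t : Nat) : Int) = ((k : Nat) : Int) := beq_iff_eq.mp hpk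
      have htk : t = k := by exact_mod_cast this
      subst htk
      exact ⟨i, hit, rfl⟩
    · rintro ⟨i, hik, rfl⟩
      refine ⟨(List.take k (List.drop i cs), ((k : Nat) : Int)), ?_, rfl⟩
      rw [List.mem_filter]
      refine ⟨(pv_mem_set cs _).mpr ⟨i, k, hik, hk0, hk20, rfl⟩, by simp⟩
  have hperm : (F.map Prod.fst).Perm (PySem.Set.ofList Bl) :=
    (List.perm_ext_iff_of_nodup hndFm hndB).mpr hmemiff
  have hlen : F.length = (PySem.Set.ofList Bl).length := by
    rw [← List.length_map Prod.fst]
    exact hperm.length_eq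
  rw [hcount]
  unfold pvB_count
  rw [← hBl, ← hlen]

theorem pv_keys_perm (cs : List Char) :
    (PySem.Set.ofList ((pvA_set cs (cs.length : Int)).map Prod.snd)).Perm
      ((List.range (min 20 cs.length)).map (fun (j : Nat) => ((j : Int) + 1))) := by
  have hndL : (PySem.Set.ofList ((pvA_set cs (cs.length : Int)).map Prod.snd)).Nodup :=
    PySem.Set.nodup_ofList _
  have hndR : ((List.range (min 20 cs.length)).map (fun (j : Nat) => ((j : Int) + 1))).Nodup := by
    refine List.Nodup.map_on ?_ (List.nodup_range)
    intro x _ y _ h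
    exact_mod_cast (by omega : (x : Int) = (y : Int) → x = y) (by linarith)
  refine (List.perm_ext_iff_of_nodup hndL hndR).mpr ?_
  intro x
  rw [PySem.Set.mem_ofList, List.mem_map]
  constructor
  · rintro ⟨p, hp, rfl⟩
    obtain ⟨i, t, hit, ht0, ht20, rfl⟩ := (pv_mem_set cs p).mp hp
    rw [List.mem_map]
    refine ⟨t - 1, List.mem_range.mpr (by omega), ?_⟩
    omega
  · intro hx
    rw [List.mem_map] at hx
    obtain ⟨j, hj, rfl⟩ := hx
    rw [List.mem_range] at hj
    refine ⟨(List.take (j+1) (List.drop 0 cs), ((j+1 : Nat) : Int)),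
      (pv_mem_set cs _).mpr ⟨0, j+1, by omega, by omega, by omega, rfl⟩, by push_cast; ring⟩

theorem pv_sorted2_eq_of_perm_of_pairwise_lt {α : Type} (xs ys : List α)
    (k1 k2 : α → Int) (hp : ys.Perm xs)
    (hs : ys.Pairwise (fun a b => k1 a < k1 b)) :
    PySem.List.sorted2 xs k1 k2 = ys := by
  have hinj : ∀ a ∈ xs, ∀ b ∈ xs, k1 a = k1 b → a = b := by
    intro a ha b hb hk
    rw [← hp.mem_iff] at ha hb
    obtain ⟨ia, hia, rfl⟩ := List.mem_iff_getElem.mp ha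
    obtain ⟨ib, hib, rfl⟩ := List.mem_iff_getElem.mp hb
    have hpg := List.pairwise_iff_getElem.mp hs
    rcases Nat.lt_trichotomy ia ib with h | h | h
    · exact absurd hk (ne_of_lt (hpg ia ib hia hib h))
    · subst h; rfl
    · exact absurd hk.symm (ne_of_lt (hpg ib ia hib hia h))
  have hcomp : ∀ a ∈ xs, ∀ b ∈ xs,
      (decide (k1 a < k1 b) || (!decide (k1 b < k1 a) && decide (k2 a < k2 b)))
        = decide (k1 a < k1 b) := by
    intro a ha b hb
    rcases lt_trichotomy (k1 a) (k1 b) with h | h | h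
    · simp [h, not_lt_of_gt h]
    · have : a = b := hinj a ha b hb h
      subst this
      simp
    · simp [not_lt_of_gt h, h]
  have haux : ∀ (l acc : List α), (∀ z ∈ l, z ∈ xs) → (∀ z ∈ acc, z ∈ xs) →
      l.foldl (fun acc x => PySem.List.insertBy
        (fun a b => decide (k1 a < k1 b) || (!decide (k1 b < k1 a) && decide (k2 a < k2 b))) x acc) acc
      = l.foldl (fun acc x => PySem.List.insertBy (fun a b => decide (k1 a < k1 b)) x acc) acc := by
    intro l
    induction l with
    | nil => intro acc _ _; rfl
    | cons x l ih =>
      intro acc hl hacc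
      simp only [List.foldl_cons]
      have hx : x ∈ xs := hl x List.mem_cons_self
      rw [pv_insertBy_congr (fun a b => decide (k1 a < k1 b) || (!decide (k1 b < k1 a) && decide (k2 a < k2 b)))
        (fun a b => decide (k1 a < k1 b)) x acc (fun b hb => hcomp x hx b (hacc b hb))]
      exact ih _ (fun z hz => hl z (List.mem_cons_of_mem x hz))
        (fun z hz => by
          rcases (PySem.List.insertBy_mem_iff _ x z acc).mp hz with rfl | hz
          · exact hx
          · exact hacc z hz)
  have hunf : PySem.List.sorted2 xs k1 k2
      = xs.foldl (fun acc x => PySem.List.insertBy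
          (fun a b => decide (k1 a < k1 b) || (!decide (k1 b < k1 a) && decide (k2 a < k2 b))) x acc) [] := by
    simp only [PySem.List.sorted2, Bool.false_eq_true, if_false]
  rw [hunf, haux xs [] (fun z hz => hz) (fun z hz => absurd hz (List.not_mem_nil)),
    ← PySem.List.sorted_eq_foldl_insertBy]
  exact PySem.List.sorted_eq_of_perm_of_pairwise_lt xs ys k1 hp hs

-- ===== VERDICT (by name: the statement is the Claim_ definition above) =====
theorem create_distribution_spec : Claim_equal_create_distribution := by
  unfold Claim_equal_create_distribution
  intro string _
  unfold Spec_create_distribution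
  show create_distribution string = create_distribution_alt string
  have hlen : PySem.Str.len string = ((string.toList.length : Nat) : Int) := by
    simp [PySem.Str.len]
  simp only [create_distribution, create_distribution_alt, hlen]
  set cs := string.toList with hcs
  set N := cs.length with hN
  set L := (pvA_set cs (N : Int)).map Prod.snd with hL
  rw [pv_count_eq_counter, PySem.Dict.items_counter]
  -- B side to a map over range
  have hmB : min 20 ((N : Nat) : Int) = (((min 20 N) : Nat) : Int) := by push_cast; rfl
  rw [hmB, pv_pyRange_one_map, PySem.List.foldl_append_singleton_eq_map, List.nil_append,
    List.map_map]
  set m := min 20 N with hm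
  set f : Int → Int × Int := fun x => (x, ((List.count x L : Nat) : Int)) with hf
  set g : Nat → Int := fun j => ((j : Int) + 1) with hg
  have hcongr : ∀ j ∈ List.range m,
      (f ∘ g) j = ((fun k => (k, pvB_count cs (N : Int) k)) ∘ g) j := by
    intro j hj
    rw [List.mem_range] at hj
    have h1 : g j = (((j + 1 : Nat)) : Int) := by simp [hg]
    have h2 := pv_count_agree cs (j+1) (by omega) (by omega) (by omega)
    simp only [Function.comp, hf, h1]
    exact congrArg _ h2
  have hperm : (((List.range m).map (fun j => ((fun k => (k, pvB_count cs (N : Int) k)) ∘ g) j))).Perm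
      ((PySem.Set.ofList L).map f) := by
    have h3 : ((PySem.Set.ofList L).map f).Perm (((List.range m).map g).map f) :=
      (pv_keys_perm cs).map f
    rw [List.map_map] at h3
    rw [← List.map_congr_left hcongr]
    exact h3.symm
  have hpair : (((List.range m).map (fun j => ((fun k => (k, pvB_count cs (N : Int) k)) ∘ g) j))).Pairwise
      (fun a b => a.1 < b.1) := by
    rw [List.pairwise_map]
    refine List.Pairwise.imp ?_ List.pairwise_lt_range
    intro a b hab
    show ((a : Int) + 1) < ((b : Int) + 1)
    omega
  exact pv_sorted2_eq_of_perm_of_pairwise_lt _ _ _ _ hperm hpair
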